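-- pv_equiv track=rewrite | github.com/wulidongdong/2018jan | category_vector.py | get_doc_category
-- ===== SOURCE A (Python) =====
-- from collections import Counter
-- import itertools
--
-- def get_doc_category(data_category):
--     doc_category_one = Counter(list(itertools.chain.from_iterable(data_category)))
--     for k in doc_category_one.keys():
--         count = 0
--         for x in data_category:
--             if k in x:
--                 count += 1
--         doc_category_one[k] = count
--
--     return doc_category_one, len(data_category)
-- ===== SOURCE B (Python) =====
-- from collections import Counter
--
-- def get_doc_category(data_category):
--     counts = {}
--     for doc in data_category:
--         seen = set()
--         for k in doc:
--             if k not in seen: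
--                 seen.add(k)
--                 counts[k] = counts.get(k, 0) + 1
--     return Counter(counts), len(data_category)
-- ===== Notes on version B (the rewrite author's own statement) =====
-- stated objective: faster
-- what changed: Replaced the per-key rescan of all documents (Counter over the flattened list, then for each key a full pass over every document) by a single pass over the documents that increments each key's count once per document via a per-document seen-set.
import Mathlib
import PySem

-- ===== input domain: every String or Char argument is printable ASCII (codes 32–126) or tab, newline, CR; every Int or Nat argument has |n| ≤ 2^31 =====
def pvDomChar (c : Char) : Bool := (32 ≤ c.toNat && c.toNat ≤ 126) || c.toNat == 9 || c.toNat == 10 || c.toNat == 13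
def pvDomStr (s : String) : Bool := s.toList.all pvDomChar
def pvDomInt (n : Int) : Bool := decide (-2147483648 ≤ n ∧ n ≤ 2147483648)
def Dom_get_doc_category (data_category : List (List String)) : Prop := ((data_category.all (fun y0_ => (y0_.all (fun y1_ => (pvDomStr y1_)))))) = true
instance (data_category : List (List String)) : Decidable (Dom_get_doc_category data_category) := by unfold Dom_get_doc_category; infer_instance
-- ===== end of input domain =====

-- B replaces A's per-key rescan of all documents by a single pass over the documents
-- with a per-document seen-set (objective: faster, asymptotically).


-- ===== PORT A =====
-- Counter(chain.from_iterable(...)), then for each key a full pass over all docs.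
-- (Python iterates the keys() view while reassigning values only; the key sequence is
-- unchanged by that, so folding over the snapshot d.keys is exact.)
def get_doc_category (data_category : List (List String)) : (List (String × Int)) × Int :=
  let d := PySem.Dict.counter data_category.flatten
  let d2 := d.keys.foldl (fun acc k =>
      let count := data_category.foldl (fun c x => if k ∈ x then c + 1 else c) (0 : Int)
      acc.insert k count) d
  (d2.items, data_category.length)

-- ===== PORT B =====
-- single pass: per doc a fresh seen-set; counts[k] = counts.get(k, 0) + 1 on first sight.
def get_doc_category_alt (data_category : List (List String)) : (List (String × Int)) × Int :=
  let counts := data_category.foldl (fun counts doc =>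
      (doc.foldl (fun (p : PySem.Dict String Int × PySem.Set String) k =>
          if PySem.Set.contains p.2 k then p
          else (p.1.insert k (p.1.getD k 0 + 1), PySem.Set.add p.2 k))
        (counts, PySem.Set.empty)).1) PySem.Dict.empty
  (counts.items, data_category.length)

-- ===== PRECONDITION & SPEC =====
def Spec_get_doc_category (data_category : List (List String)) (out : (List (String × Int)) × Int) : Prop := out = get_doc_category_alt data_category
instance (data_category : List (List String)) (out : (List (String × Int)) × Int) : Decidable (Spec_get_doc_category data_category out) := by unfold Spec_get_doc_category; infer_instance

-- ===== CLAIM (what is proved, stated in full; the proofs are below) =====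
def Claim_equal_get_doc_category : Prop := ∀ (data_category : List (List String)), Dom_get_doc_category data_category → Spec_get_doc_category data_category (get_doc_category data_category)

-- ===== LEMMAS AND PROOFS =====

-- A's rewrite loop over the dict's own keys: every key gets its (dict-independent) value.
theorem pv_foldl_insert_getD {l : List String} {d : PySem.Dict String Int} (v : String → Int)
    (k : String) :
    (l.foldl (fun acc k => acc.insert k (v k)) d).getD k 0
      = if k ∈ l then v k else d.getD k 0 := by
  induction l generalizing d with
  | nil => simp
  | cons a l ih =>
      simp only [List.foldl_cons, ih, PySem.Dict.getD_insert, List.mem_cons]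
      by_cases hl : k ∈ l <;> by_cases ha : k = a <;> simp [hl, ha]

theorem pv_foldl_insert_keys {l : List String} {d : PySem.Dict String Int} (v : String → Int)
    (h : ∀ k ∈ l, k ∈ d.keys) :
    (l.foldl (fun acc k => acc.insert k (v k)) d).keys = d.keys := by
  induction l generalizing d with
  | nil => rfl
  | cons a l ih =>
      have ha : d.contains a = true := by
        rw [PySem.Dict.contains_iff_mem_keys]; exact h a (by simp)
      rw [List.foldl_cons, ih]
      · exact PySem.Dict.keys_insert_of_contains _ _ ha
      · intro k hk
        rw [PySem.Dict.keys_insert_of_contains _ _ ha]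
        exact h k (by simp [hk])

-- B's inner loop over one document: the seen-set guarantees one increment per distinct
-- element; keys grow exactly by the document's fresh elements, in first-occurrence order.
theorem pv_inner (doc : List String) (d : PySem.Dict String Int) (seen : PySem.Set String)
    (hs : ∀ x ∈ seen, x ∈ d.keys) (hnd : d.keys.Nodup) :
    let r := doc.foldl (fun (p : PySem.Dict String Int × PySem.Set String) k =>
        if PySem.Set.contains p.2 k then p
        else (p.1.insert k (p.1.getD k 0 + 1), PySem.Set.add p.2 k)) (d, seen)
    r.1.keys = PySem.Set.update d.keys doc
      ∧ r.1.keys.Nodup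
      ∧ (∀ k, r.1.getD k 0 = d.getD k 0 + if k ∈ doc ∧ k ∉ seen then 1 else 0) := by
  induction doc generalizing d seen with
  | nil => simp only [List.foldl_nil]; exact ⟨by simp [PySem.Set.update_nil], hnd, by simp⟩
  | cons a doc ih =>
      simp only [List.foldl_cons]
      by_cases hc : a ∈ seen
      · have hcb : PySem.Set.contains seen a = true := by
          rw [PySem.Set.contains_iff]; exact hc
        simp only [hcb, if_true]
        obtain ⟨h1, h2, h3⟩ := ih d seen hs hnd
        refine ⟨?_, h2, ?_⟩
        · rw [h1, PySem.Set.update_cons, PySem.Set.add_of_mem (hs a hc)]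
        · intro k
          rw [h3 k]
          by_cases hk : k = a
          · subst hk; simp [hc]
          · simp only [List.mem_cons]
            by_cases hkd : k ∈ doc <;> simp [hk, hkd]
      · have hcb : PySem.Set.contains seen a = false := by
          rw [Bool.eq_false_iff, Ne, PySem.Set.contains_iff]; exact hc
        simp only [hcb, Bool.false_eq_true, if_false]
        obtain ⟨h1, h2, h3⟩ :=
          ih (d.insert a (d.getD a 0 + 1)) (PySem.Set.add seen a)
            (by intro x hx
                rw [PySem.Set.mem_add] at hx
                rcases hx with hx | hx
                · rw [PySem.Dict.mem_keys_insert]; exact Or.inr (hs x hx)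
                · subst hx; rw [PySem.Dict.mem_keys_insert]; exact Or.inl rfl)
            (PySem.Dict.nodup_keys_insert _ _ _ hnd)
        refine ⟨?_, h2, ?_⟩
        · rw [h1, PySem.Set.update_cons]
          congr 1
          by_cases had : a ∈ d.keys
          · rw [PySem.Dict.keys_insert_of_contains _ _
              (by rw [PySem.Dict.contains_iff_mem_keys]; exact had),
              PySem.Set.add_of_mem had]
          · rw [PySem.Dict.keys_insert_of_not_contains _ _
              (by rw [Bool.eq_false_iff, Ne, PySem.Dict.contains_iff_mem_keys]; exact had),
              PySem.Set.add_of_not_mem had]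
        · intro k
          rw [h3 k, PySem.Dict.getD_insert]
          by_cases hk : k = a
          · subst hk
            simp [hc]
          · simp only [hk, if_false, List.mem_cons, PySem.Set.mem_add]
            by_cases hkd : k ∈ doc <;> by_cases hks : k ∈ seen <;> simp [hkd, hks]

-- B's outer loop: keys accumulate the flattened first occurrences; each key's value is
-- the number of processed documents containing it.
theorem pv_outer (data : List (List String)) (d : PySem.Dict String Int) (hnd : d.keys.Nodup) :
    let r := data.foldl (fun counts doc =>
      (doc.foldl (fun (p : PySem.Dict String Int × PySem.Set String) k =>
          if PySem.Set.contains p.2 k then p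
          else (p.1.insert k (p.1.getD k 0 + 1), PySem.Set.add p.2 k))
        (counts, PySem.Set.empty)).1) d
    r.keys = PySem.Set.update d.keys data.flatten
      ∧ r.keys.Nodup
      ∧ (∀ k, r.getD k 0 = d.getD k 0 + (data.countP (fun x => decide (k ∈ x)) : Int)) := by
  induction data generalizing d with
  | nil => simp only [List.foldl_nil]; exact ⟨by simp [PySem.Set.update_nil], hnd, by simp⟩
  | cons doc data ih =>
      simp only [List.foldl_cons]
      obtain ⟨h1, h2, h3⟩ := pv_inner doc d PySem.Set.empty (by intro x hx; cases hx) hnd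
      obtain ⟨g1, g2, g3⟩ := ih _ h2
      refine ⟨?_, g2, ?_⟩
      · rw [g1, h1, List.flatten_cons, PySem.Set.update_append]
      · intro k
        rw [g3 k, h3 k, List.countP_cons]
        by_cases hk : k ∈ doc
        · simp [hk]
          ring
        · simp [hk]

-- ===== VERDICT (by name: the statement is the Claim_ definition above) =====
theorem get_doc_category_spec : Claim_equal_get_doc_category := by
  intro data _
  unfold Spec_get_doc_category get_doc_category get_doc_category_alt
  obtain ⟨h1, h2, h3⟩ := pv_outer data PySem.Dict.empty (by simp)
  refine Prod.ext ?_ rfl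
  simp only
  have hkeysA : ∀ k ∈ (PySem.Dict.counter data.flatten).keys,
      k ∈ (PySem.Dict.counter data.flatten).keys := fun k hk => hk
  have hK := pv_foldl_insert_keys
    (l := (PySem.Dict.counter data.flatten).keys) (d := PySem.Dict.counter data.flatten)
    (fun k => data.foldl (fun c x => if k ∈ x then c + 1 else c) (0 : Int)) hkeysA
  rw [PySem.Dict.items_eq_map_keys _ (by rw [hK]; exact PySem.Dict.nodup_keys_counter _) 0,
      PySem.Dict.items_eq_map_keys _ h2 0, hK, h1, PySem.Dict.keys_counter]
  have hempty : (PySem.Dict.empty : PySem.Dict String Int).keys = [] := rfl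
  rw [hempty, PySem.Set.update_nil_left]
  apply List.map_congr_left
  intro k hk
  rw [PySem.Set.mem_ofList] at hk
  rw [pv_foldl_insert_getD
    (fun k => data.foldl (fun c x => if k ∈ x then c + 1 else c) (0 : Int)) k]
  rw [if_pos (show k ∈ PySem.Set.ofList data.flatten by
        rw [PySem.Set.mem_ofList]; exact hk), h3 k]
  have := PySem.List.foldl_count_if (fun x => decide (k ∈ x)) data 0
  simp only [decide_eq_true_eq] at this
  simp [PySem.Dict.getD_empty, this]
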